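-- pv_equiv track=rewrite | github.com/AtharvRN/SAVLGCBM | data/sam3_concept_mask_cache.py | canonicalize_concept_label
-- ===== SOURCE A (Python) =====
-- def canonicalize_concept_label(s: str) -> str:
--     normalized = s.lower()
--     for ch in "-,.()":
--         normalized = normalized.replace(ch, " ")
--     normalized = " ".join(normalized.split())
--     if normalized.startswith("a "):
--         normalized = normalized[2:]
--     elif normalized.startswith("an "):
--         normalized = normalized[3:]
--     return " ".join(normalized.split())
-- ===== SOURCE B (Python) =====
-- def canonicalize_concept_label(s: str) -> str:
--     words = []
--     cur = []
--     for ch in s.lower():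
--         if ch.isspace() or ch in "-,.()":
--             if cur:
--                 words.append("".join(cur))
--                 cur = []
--         else:
--             cur.append(ch)
--     if cur:
--         words.append("".join(cur))
--     if len(words) > 1 and words[0] in ("a", "an"):
--         words = words[1:]
--     return " ".join(words)
-- ===== Notes on version B (the rewrite author's own statement) =====
-- stated objective: alternative
-- what changed: Replaces A's five whole-string replace passes plus two split/join passes and string-prefix stripping by a single character-by-character tokenizing scan that collects words directly and drops a leading indefinite-article token when more than one word remains.
import Mathlib
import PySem

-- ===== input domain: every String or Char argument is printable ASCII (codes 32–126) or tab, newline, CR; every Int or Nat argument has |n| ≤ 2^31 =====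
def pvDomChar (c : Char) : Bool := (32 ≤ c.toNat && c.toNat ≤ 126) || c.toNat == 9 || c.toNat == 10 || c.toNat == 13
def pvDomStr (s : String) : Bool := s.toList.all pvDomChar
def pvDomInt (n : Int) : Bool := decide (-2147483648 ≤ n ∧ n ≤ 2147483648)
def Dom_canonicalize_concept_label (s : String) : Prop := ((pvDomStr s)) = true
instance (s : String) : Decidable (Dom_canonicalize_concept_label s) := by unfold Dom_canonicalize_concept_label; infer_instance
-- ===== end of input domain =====

-- B replaces A's five replace passes + repeated split/join and prefix stripping by one tokenizing scan; same result, similar cost (objective: alternative).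

-- ===== PORT A =====
def canonicalize_concept_label (s : String) : String :=
  let normalized := PySem.Str.lower s
  let normalized := ("-,.()".toList).foldl
    (fun n ch => PySem.Str.replace n (String.ofList [ch]) " ") normalized
  let normalized := PySem.Str.join " " (PySem.Str.split₀ normalized)
  let normalized :=
    if PySem.Str.startswith normalized "a " then PySem.Str.slice normalized (some 2) none
    else if PySem.Str.startswith normalized "an " then PySem.Str.slice normalized (some 3) none
    else normalized
  PySem.Str.join " " (PySem.Str.split₀ normalized)

-- ===== PORT B =====
-- words are carried as List Char (Python builds them with "".join(cur)); one left fold = B's single for-loop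
def canonicalize_concept_label_alt (s : String) : String :=
  let st := (PySem.Str.lower s).toList.foldl
    (fun (st : List (List Char) × List Char) ch =>
      if PySem.Chars.isspace ch || (ch ∈ ['-', ',', '.', '(', ')']) then
        if st.2.isEmpty then st else (st.1 ++ [st.2], [])
      else (st.1, st.2 ++ [ch]))
    ([], [])
  let words := if st.2.isEmpty then st.1 else st.1 ++ [st.2]
  let words := match words with
    | w :: x :: xs => if w = ['a'] ∨ w = ['a', 'n'] then x :: xs else w :: x :: xs
    | ws => ws
  String.ofList (PySem.Chars.join [' '] words)

-- ===== PRECONDITION & SPEC =====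
def Spec_canonicalize_concept_label (s : String) (out : String) : Prop := out = canonicalize_concept_label_alt s
instance (s : String) (out : String) : Decidable (Spec_canonicalize_concept_label s out) := by unfold Spec_canonicalize_concept_label; infer_instance

-- ===== CLAIM (what is proved, stated in full; the proofs are below) =====
def Claim_equal_canonicalize_concept_label : Prop := ∀ (s : String), Dom_canonicalize_concept_label s → Spec_canonicalize_concept_label s (canonicalize_concept_label s)

-- ===== LEMMAS AND PROOFS =====

def sepc (c : Char) : Bool := PySem.Chars.isspace c || (c ∈ ['-', ',', '.', '(', ')'])

def Fmap (c : Char) : Char := if c ∈ ['-', ',', '.', '(', ')'] then ' ' else c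

def toks (p : Char → Bool) : List Char → List (List Char)
  | [] => []
  | c :: rest =>
    if p c then toks p rest
    else (c :: rest.takeWhile (fun d => !p d)) :: toks p (rest.dropWhile (fun d => !p d))
  termination_by l => l.length
  decreasing_by
    · simp
    · exact Nat.lt_succ_of_le (List.length_dropWhile_le _ _)

lemma replace_go_single (c d : Char) (l acc : List Char) (fuel : Nat) (h : l.length ≤ fuel) :
    PySem.Chars.replace.go [c] [d] fuel l acc
      = acc.reverse ++ l.map (fun x => if x = c then d else x) := by
  induction l generalizing fuel acc with
  | nil => cases fuel <;> simp [PySem.Chars.replace.go]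
  | cons x t ih =>
    cases fuel with
    | zero => simp at h
    | succ f =>
      simp only [PySem.Chars.replace.go]
      by_cases hx : x = c
      · subst hx
        simp only [List.isPrefixOf, BEq.rfl, Bool.true_and, if_pos, List.length_cons,
          List.length_nil, List.drop_succ_cons, List.drop_zero, List.reverse_cons,
          List.reverse_nil, List.nil_append, List.singleton_append]
        rw [ih (d :: acc) f (by simpa using h)]
        simp
      · have : ([c].isPrefixOf (x :: t)) = false := by
          simp [List.isPrefixOf]
          exact fun hc => (hx hc.symm).elim
        rw [this]
        simp only [Bool.false_eq_true, if_false]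
        rw [ih (x :: acc) f (by simpa using h)]
        simp [hx]

lemma replace_single (c d : Char) (l : List Char) :
    PySem.Chars.replace l [c] [d] = l.map (fun x => if x = c then d else x) := by
  simp only [PySem.Chars.replace, List.isEmpty_cons, Bool.false_eq_true, if_false]
  exact replace_go_single c d l [] l.length le_rfl

lemma Fcomp (x : Char) :
    (fun a => if a = ')' then ' ' else a)
      ((fun a => if a = '(' then ' ' else a)
        ((fun a => if a = '.' then ' ' else a)
          ((fun a => if a = ',' then ' ' else a)
            ((fun a => if a = '-' then ' ' else a) x)))) = Fmap x := by
  by_cases hx : x ∈ (['-', ',', '.', '(', ')'] : List Char)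
  · simp only [List.mem_cons, List.not_mem_nil, or_false] at hx
    rcases hx with rfl | rfl | rfl | rfl | rfl <;> decide
  · simp only [List.mem_cons, List.not_mem_nil, or_false, not_or] at hx
    obtain ⟨h1, h2, h3, h4, h5⟩ := hx
    simp [Fmap, h1, h2, h3, h4, h5]

lemma A_replaces (n0 : String) :
    (("-,.()".toList).foldl
      (fun n ch => PySem.Str.replace n (String.ofList [ch]) " ") n0).toList
    = n0.toList.map Fmap := by
  have he : "-,.()".toList = ['-', ',', '.', '(', ')'] := by decide
  have hsp : " ".toList = [' '] := by decide
  rw [he]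
  simp only [List.foldl_cons, List.foldl_nil]
  simp only [PySem.Str.toList_replace, String.toList_ofList, hsp, replace_single, List.map_map]
  apply List.map_congr_left
  intro x _
  simp only [Function.comp_apply]
  exact Fcomp x

lemma split₀_go_eq (l : List Char) : ∀ (cur : List Char) (accw : List (List Char)),
    PySem.Chars.split₀.go l cur accw
    = accw.reverse ++ (if cur.isEmpty then toks PySem.Chars.isspace l
        else (cur.reverse ++ l.takeWhile (fun d => !PySem.Chars.isspace d))
              :: toks PySem.Chars.isspace (l.dropWhile (fun d => !PySem.Chars.isspace d))) := by
  induction l with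
  | nil =>
    intro cur accw
    by_cases hc : cur.isEmpty <;> simp [PySem.Chars.split₀.go, toks, hc]
  | cons c rest ih =>
    intro cur accw
    by_cases hs : PySem.Chars.isspace c
    · by_cases hc : cur.isEmpty
      · simp only [PySem.Chars.split₀.go, hs, if_pos, hc]
        rw [ih [] accw]
        simp [toks, hs]
      · simp only [PySem.Chars.split₀.go, hs, if_pos, hc, Bool.false_eq_true, if_false]
        rw [ih [] (cur.reverse :: accw)]
        simp [toks, hs]
    · simp only [PySem.Chars.split₀.go, hs, Bool.false_eq_true, if_false]
      rw [ih (c :: cur) accw]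
      by_cases hc : cur.isEmpty
      · have : cur = [] := by simpa using hc
        subst this
        simp [toks, hs]
      · simp [hs, hc]


lemma split₀_eq_toks (l : List Char) :
    PySem.Chars.split₀ l = toks PySem.Chars.isspace l := by
  have := split₀_go_eq l [] []
  simpa [PySem.Chars.split₀] using this

lemma toks_map (p : Char → Bool) (f : Char → Char) : ∀ (l : List Char),
    toks p (l.map f) = (toks (fun c => p (f c)) l).map (List.map f) := by
  have key : ∀ (n : Nat) (l : List Char), l.length ≤ n →
      toks p (l.map f) = (toks (fun c => p (f c)) l).map (List.map f) := by
    intro n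
    induction n with
    | zero => intro l h; have hl : l = [] := List.eq_nil_of_length_eq_zero (Nat.le_zero.mp h); subst hl; simp [toks]
    | succ n ih =>
      intro l h
      cases l with
      | nil => simp [toks]
      | cons c rest =>
        simp only [List.map_cons, toks]
        by_cases hc : p (f c)
        · simp only [hc, if_true]
          exact ih rest (by simpa using h)
        · simp only [hc, Bool.false_eq_true, if_false, List.takeWhile_map, List.dropWhile_map,
            Function.comp_def]
          rw [ih (rest.dropWhile (fun d => !p (f d))) (le_trans (List.length_dropWhile_le _ _) (by simpa using h))]
          simp
  intro l; exact key l.length l le_rfl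


lemma toks_good (p : Char → Bool) : ∀ (l : List Char),
    ∀ w ∈ toks p l, w ≠ [] ∧ ∀ c ∈ w, p c = false := by
  have key : ∀ (n : Nat) (l : List Char), l.length ≤ n →
      ∀ w ∈ toks p l, w ≠ [] ∧ ∀ c ∈ w, p c = false := by
    intro n
    induction n with
    | zero => intro l h; have hl : l = [] := List.eq_nil_of_length_eq_zero (Nat.le_zero.mp h); subst hl; simp [toks]
    | succ n ih =>
      intro l h w hw
      cases l with
      | nil => simp [toks] at hw
      | cons c rest =>
        simp only [toks] at hw
        by_cases hc : p c
        · rw [if_pos hc] at hw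
          exact ih rest (by simpa using h) w hw
        · rw [if_neg (by simp [hc])] at hw
          rcases List.mem_cons.mp hw with rfl | hw'
          · refine ⟨by simp, ?_⟩
            intro x hx
            rcases List.mem_cons.mp hx with rfl | hx'
            · simpa using hc
            · simpa using List.mem_takeWhile_imp hx'
          · exact ih (rest.dropWhile (fun d => !p d)) (le_trans (List.length_dropWhile_le _ _) (by simpa using h)) w hw'
  intro l; exact key l.length l le_rfl


lemma toks_join (p : Char → Bool) (hsp : p ' ' = true) : ∀ (ws : List (List Char)),
    (∀ w ∈ ws, w ≠ [] ∧ ∀ c ∈ w, p c = false) →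
    toks p (List.intercalate [' '] ws) = ws := by
  intro ws
  induction ws with
  | nil => intro _; simp [List.intercalate, toks]
  | cons w ws ih =>
    intro h
    obtain ⟨hw, hgood⟩ := h w (by simp)
    obtain ⟨c, w', rfl⟩ := List.exists_cons_of_ne_nil hw
    have hpc : p c = false := hgood c (by simp)
    have hw' : ∀ x ∈ w', p x = false := fun x hx => hgood x (by simp [hx])
    have htw : w'.takeWhile (fun d => !p d) = w' := List.takeWhile_eq_self_iff.mpr (by intro x hx; simp [hw' x hx])
    have hdw : w'.dropWhile (fun d => !p d) = [] := List.dropWhile_eq_nil_iff.mpr (by intro x hx; simp [hw' x hx])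
    cases ws with
    | nil =>
      simp only [List.intercalate, List.intersperse, List.flatten]
      simp [toks, hpc, htw, hdw]
    | cons v ws' =>
      have hi : List.intercalate [' '] ((c :: w') :: v :: ws')
          = (c :: w') ++ ' ' :: List.intercalate [' '] (v :: ws') := by
        simp [List.intercalate, List.intersperse, List.flatten]
      rw [hi]
      simp only [List.cons_append, toks, hpc, Bool.false_eq_true, if_false]
      have h1 : (w' ++ ' ' :: List.intercalate [' '] (v :: ws')).takeWhile (fun d => !p d) = w' := by
        rw [List.takeWhile_append]
        simp [htw, hsp]
      have h2 : (w' ++ ' ' :: List.intercalate [' '] (v :: ws')).dropWhile (fun d => !p d)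
          = ' ' :: List.intercalate [' '] (v :: ws') := by
        rw [List.dropWhile_append]
        simp [hdw, hsp]
      rw [h1, h2]
      have h3 : toks p (' ' :: List.intercalate [' '] (v :: ws')) = toks p (List.intercalate [' '] (v :: ws')) := by
        simp [toks, hsp]
      rw [h3, ih (fun x hx => h x (by simp [hx]))]



lemma str_ext {s t : String} (h : s.toList = t.toList) : s = t := by
  have := congrArg String.ofList h
  simpa using this

lemma isspace_Fmap (c : Char) : PySem.Chars.isspace (Fmap c) = sepc c := by
  by_cases hm : c ∈ (['-', ',', '.', '(', ')'] : List Char)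
  · simp only [List.mem_cons, List.not_mem_nil, or_false] at hm
    rcases hm with rfl | rfl | rfl | rfl | rfl <;> decide
  · simp [Fmap, hm, sepc]

lemma Fmap_of_sepc_false {c : Char} (h : sepc c = false) : Fmap c = c := by
  simp only [sepc, Bool.or_eq_false_iff, decide_eq_false_iff_not] at h
  simp [Fmap, h.2]

lemma isspace_of_sepc_false {c : Char} (h : sepc c = false) : PySem.Chars.isspace c = false := by
  simp only [sepc, Bool.or_eq_false_iff] at h
  exact h.1

lemma finalize (n : String) (ws : List (List Char))
    (hgood : ∀ w ∈ ws, w ≠ [] ∧ ∀ c ∈ w, PySem.Chars.isspace c = false)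
    (h : n.toList = List.intercalate [' '] ws) :
    PySem.Str.join " " (PySem.Str.split₀ n) = String.ofList (List.intercalate [' '] ws) := by
  have hsp : " ".toList = [' '] := by decide
  apply str_ext
  rw [PySem.Str.toList_join, PySem.Str.split₀_map_toList, h, split₀_eq_toks,
    toks_join _ (by decide) ws hgood]
  simp [PySem.Chars.join, hsp]

lemma alt_fold : ∀ (l : List Char) (ws : List (List Char)) (cur : List Char),
    (if (l.foldl (fun (st : List (List Char) × List Char) ch =>
          if PySem.Chars.isspace ch || (ch ∈ ['-', ',', '.', '(', ')']) then
            if st.2.isEmpty then st else (st.1 ++ [st.2], [])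
          else (st.1, st.2 ++ [ch])) (ws, cur)).2.isEmpty
     then (l.foldl (fun (st : List (List Char) × List Char) ch =>
          if PySem.Chars.isspace ch || (ch ∈ ['-', ',', '.', '(', ')']) then
            if st.2.isEmpty then st else (st.1 ++ [st.2], [])
          else (st.1, st.2 ++ [ch])) (ws, cur)).1
     else (l.foldl (fun (st : List (List Char) × List Char) ch =>
          if PySem.Chars.isspace ch || (ch ∈ ['-', ',', '.', '(', ')']) then
            if st.2.isEmpty then st else (st.1 ++ [st.2], [])
          else (st.1, st.2 ++ [ch])) (ws, cur)).1
          ++ [(l.foldl (fun (st : List (List Char) × List Char) ch =>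
          if PySem.Chars.isspace ch || (ch ∈ ['-', ',', '.', '(', ')']) then
            if st.2.isEmpty then st else (st.1 ++ [st.2], [])
          else (st.1, st.2 ++ [ch])) (ws, cur)).2])
    = ws ++ (if cur.isEmpty then toks sepc l
             else (cur ++ l.takeWhile (fun d => !sepc d))
                   :: toks sepc (l.dropWhile (fun d => !sepc d))) := by
  intro l
  induction l with
  | nil =>
    intro ws cur
    by_cases hc : cur.isEmpty <;> simp [toks, hc]
  | cons c rest ih =>
    intro ws cur
    simp only [List.foldl_cons]
    by_cases hs : sepc c
    · have hs' : (PySem.Chars.isspace c || (c ∈ ['-', ',', '.', '(', ')'])) = true := hs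
      by_cases hc : cur.isEmpty
      · have hc' : cur = [] := by simpa using hc
        subst hc'
        simp only [hs', List.isEmpty_nil, if_pos]
        rw [ih ws []]
        simp [toks, hs]
      · simp only [hs', if_true, hc, Bool.false_eq_true, if_false]
        rw [ih (ws ++ [cur]) []]
        simp [toks, hs]
    · have hs' : (PySem.Chars.isspace c || (c ∈ ['-', ',', '.', '(', ')'])) = false := by
        simpa [sepc] using hs
      simp only [hs', Bool.false_eq_true, if_false]
      rw [ih ws (cur ++ [c])]
      by_cases hc : cur.isEmpty
      · have hc' : cur = [] := by simpa using hc
        subst hc'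
        simp [toks, hs]
      · simp [hs, hc]

lemma intercalate_cons_cons (w v : List Char) (ws : List (List Char)) :
    List.intercalate [' '] (w :: v :: ws) = w ++ ' ' :: List.intercalate [' '] (v :: ws) := by
  simp [List.intercalate, List.intersperse, List.flatten]

lemma intercalate_singleton (w : List Char) : List.intercalate [' '] [w] = w := by
  simp [List.intercalate, List.intersperse, List.flatten]

-- ===== VERDICT (by name: the statement is the Claim_ definition above) =====
theorem canonicalize_concept_label_spec : Claim_equal_canonicalize_concept_label := by
  intro s _
  unfold Spec_canonicalize_concept_label
  simp only [canonicalize_concept_label, canonicalize_concept_label_alt]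
  rw [alt_fold]
  simp only [List.isEmpty_nil, if_true, List.nil_append, PySem.Str.toList_lower]
  set L := PySem.Chars.lower s.toList with hLdef
  set N3 := PySem.Str.join " " (PySem.Str.split₀ (List.foldl (fun n ch => PySem.Str.replace n (String.ofList [ch]) " ") (PySem.Str.lower s) "-,.()".toList)) with hN3def
  have hgood : ∀ w ∈ toks sepc L, w ≠ [] ∧ ∀ c ∈ w, sepc c = false := toks_good sepc L
  have hgoods : ∀ w ∈ toks sepc L, w ≠ [] ∧ ∀ c ∈ w, PySem.Chars.isspace c = false :=
    fun w hw => ⟨(hgood w hw).1, fun c hc => isspace_of_sepc_false ((hgood w hw).2 c hc)⟩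
  have h2 : (List.foldl (fun n ch => PySem.Str.replace n (String.ofList [ch]) " ") (PySem.Str.lower s) "-,.()".toList).toList = L.map Fmap := by
    rw [A_replaces, PySem.Str.toList_lower]
  have hmapid : (toks sepc L).map (List.map Fmap) = toks sepc L :=
    ((List.map_congr_left (fun w hw =>
        (List.map_congr_left (fun c hc => Fmap_of_sepc_false ((hgood w hw).2 c hc))).trans
          (List.map_id w))).trans (List.map_id _))
  have hN3 : N3.toList = List.intercalate [' '] (toks sepc L) := by
    rw [hN3def, PySem.Str.toList_join, PySem.Str.split₀_map_toList, h2, split₀_eq_toks, toks_map]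
    rw [funext isspace_Fmap, hmapid]
    simp [PySem.Chars.join, show " ".toList = [' '] from by decide]
  have hsw : ∀ (p : String), PySem.Str.startswith N3 p = PySem.Chars.startswith (List.intercalate [' '] (toks sepc L)) p.toList := by
    intro p; rw [PySem.Str.startswith_eq, hN3]
  have hswa := hsw "a "
  have hswan := hsw "an "
  rw [show ("a " : String).toList = ['a', ' '] from by decide] at hswa
  rw [show ("an " : String).toList = ['a', 'n', ' '] from by decide] at hswan
  have hsl : ∀ (k : Int), 0 ≤ k → (PySem.Str.slice N3 (some k) none).toList = (List.intercalate [' '] (toks sepc L)).drop k.toNat := by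
    intro k hk
    rw [PySem.Str.toList_slice, PySem.Chars.slice_eq_listSlice, PySem.List.slice_from _ hk, hN3]
  cases hW : toks sepc L with
  | nil =>
    rw [hW] at hswa hswan hN3
    rw [hswa, hswan]
    rw [show PySem.Chars.startswith ([' '].intercalate []) ['a', ' '] = false from by decide,
        show PySem.Chars.startswith ([' '].intercalate []) ['a', 'n', ' '] = false from by decide]
    simp only [Bool.false_eq_true, if_false]
    rw [finalize N3 [] (by simp) (by simpa using hN3)]
    simp [PySem.Chars.join]
  | cons w W' =>
    rw [hW] at hswa hswan hN3 hsl hgood hgoods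
    obtain ⟨hwne, hwgood⟩ := hgood w (List.mem_cons_self)
    obtain ⟨c, w', rfl⟩ := List.exists_cons_of_ne_nil hwne
    have hnsp : ∀ x ∈ c :: w', x ≠ ' ' := by
      intro x hx hx'
      have := hwgood x hx
      rw [hx'] at this
      exact absurd this (by decide)
    cases W' with
    | nil =>
      have hpa : PySem.Chars.startswith (List.intercalate [' '] [c :: w']) ['a', ' '] = false := by
        rw [intercalate_singleton, Bool.eq_false_iff]
        intro htrue
        exact hnsp ' ' (((PySem.Chars.startswith_iff _ _).mp htrue).sublist.subset (by simp)) rfl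
      have hpan : PySem.Chars.startswith (List.intercalate [' '] [c :: w']) ['a', 'n', ' '] = false := by
        rw [intercalate_singleton, Bool.eq_false_iff]
        intro htrue
        exact hnsp ' ' (((PySem.Chars.startswith_iff _ _).mp htrue).sublist.subset (by simp)) rfl
      rw [hswa, hswan, hpa, hpan]
      simp only [Bool.false_eq_true, if_false]
      rw [finalize N3 [c :: w'] hgoods hN3]
      simp [PySem.Chars.join]
    | cons v rest =>
      have hN3' := hN3
      rw [intercalate_cons_cons] at hN3'
      have hgtail : ∀ w ∈ v :: rest, w ≠ [] ∧ ∀ x ∈ w, PySem.Chars.isspace x = false :=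
        fun w hw => hgoods w (List.mem_cons_of_mem _ hw)
      cases w' with
      | nil =>
        by_cases hca : c = 'a'
        · subst hca
          rw [hswa, intercalate_cons_cons,
            show PySem.Chars.startswith (['a'] ++ ' ' :: List.intercalate [' '] (v :: rest)) ['a', ' '] = true from by
              simp [PySem.Chars.startswith, List.isPrefixOf]]
          simp only [if_true]
          rw [finalize (PySem.Str.slice N3 (some 2) none) (v :: rest) hgtail (by
            rw [hsl 2 (by decide), intercalate_cons_cons]
            simp)]
          simp [PySem.Chars.join]
        · rw [hswa, hswan, intercalate_cons_cons,
            show PySem.Chars.startswith (([c] : List Char) ++ ' ' :: List.intercalate [' '] (v :: rest)) ['a', ' '] = false from by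
              simp [PySem.Chars.startswith, List.isPrefixOf, Ne.symm hca],
            show PySem.Chars.startswith (([c] : List Char) ++ ' ' :: List.intercalate [' '] (v :: rest)) ['a', 'n', ' '] = false from by
              simp [PySem.Chars.startswith, List.isPrefixOf]]
          simp only [Bool.false_eq_true, if_false]
          rw [finalize N3 ([c] :: v :: rest) hgoods hN3]
          simp [PySem.Chars.join, hca]
      | cons d w'' =>
        have hd : d ≠ ' ' := hnsp d (by simp)
        have hswaF : PySem.Chars.startswith (List.intercalate [' '] ((c :: d :: w'') :: v :: rest)) ['a', ' '] = false := by
          rw [intercalate_cons_cons]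
          simp [PySem.Chars.startswith, List.isPrefixOf, Ne.symm hd]
        cases w'' with
        | nil =>
          by_cases han : c = 'a' ∧ d = 'n'
          · obtain ⟨rfl, rfl⟩ := han
            rw [hswa, hswan, hswaF, intercalate_cons_cons,
              show PySem.Chars.startswith ((['a', 'n'] : List Char) ++ ' ' :: List.intercalate [' '] (v :: rest)) ['a', 'n', ' '] = true from by
                simp [PySem.Chars.startswith, List.isPrefixOf]]
            simp only [Bool.false_eq_true, if_false, if_true]
            rw [finalize (PySem.Str.slice N3 (some 3) none) (v :: rest) hgtail (by
              rw [hsl 3 (by decide), intercalate_cons_cons]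
              simp)]
            simp [PySem.Chars.join]
          · have hswanF : PySem.Chars.startswith (List.intercalate [' '] ((c :: d :: ([] : List Char)) :: v :: rest)) ['a', 'n', ' '] = false := by
              rw [intercalate_cons_cons, Bool.eq_false_iff]
              intro htrue
              simp [PySem.Chars.startswith, List.isPrefixOf] at htrue
              exact han ⟨htrue.1.symm, htrue.2.symm⟩
            rw [hswa, hswan, hswaF, hswanF]
            simp only [Bool.false_eq_true, if_false]
            rw [finalize N3 ((c :: d :: []) :: v :: rest) hgoods hN3]
            have hcond : ((c :: d :: ([] : List Char)) = ['a'] ∨ (c :: d :: ([] : List Char)) = ['a', 'n']) ↔ (c = 'a' ∧ d = 'n') := by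
              simp
            simp [PySem.Chars.join, han]
        | cons e w3 =>
          have he : e ≠ ' ' := hnsp e (by simp)
          have hswanF : PySem.Chars.startswith (List.intercalate [' '] ((c :: d :: e :: w3) :: v :: rest)) ['a', 'n', ' '] = false := by
            rw [intercalate_cons_cons]
            simp [PySem.Chars.startswith, List.isPrefixOf, Ne.symm he]
          rw [hswa, hswan, hswaF, hswanF]
          simp only [Bool.false_eq_true, if_false]
          rw [finalize N3 ((c :: d :: e :: w3) :: v :: rest) hgoods hN3]
          simp [PySem.Chars.join]
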